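-- pv_equiv track=rewrite | github.com/Ashiq-am/Path-of-Python | 13.Numpy/1.Numpy Articles(G)/Maximum coins such that root to leaf path sum is positive/Maximum coins such that root to leaf path sum is positive.py | max_coins_collect
-- ===== SOURCE A (Python) =====
-- def max_coins_collect(N, edges, A):
-- 	# Declaring Adjacency List for tree
-- 	adj = [[] for _ in range(N)]
--
-- 	# Filling Adjacency List
-- 	for edge in edges:
-- 		adj[edge[0]].append(edge[1])
-- 		adj[edge[1]].append(edge[0])
--
-- 	# DP array initialized with zero
-- 	dp = [0] * N
--
-- 	# dfs function
-- 	def dfs(v, p):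
-- 		# iterating over child nodes
-- 		for u in adj[v]:
-- 			# if child of v is not equal to its parent
-- 			if u != p:
-- 				# call dfs function for child u
-- 				dfs(u, v)
-- 				# adding maximum coins chosen for child nodes
-- 				dp[v] += dp[u]
--
-- 		# base case
-- 		if v != 0 and len(adj[v]) == 1:
-- 			dp[v] = A[v]
-- 		else:
-- 			# Either choose maximum coins by child nodes or
-- 			# coins present on the root of the tree
-- 			dp[v] = min(dp[v], A[v])
--
-- 	# calling dfs function
-- 	dfs(0, -1)
--
-- 	# variable to store total coins
-- 	total_coins = sum(A)
--
-- 	# returning final answer total_coins - minimum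
-- 	# coins required so that path sum from root to
-- 	# any leaf node is non zero
-- 	return total_coins - dp[0]
-- ===== SOURCE B (Python) =====
-- def max_coins_collect(N, edges, A):
--     # Iterative post-order traversal with an explicit stack of (node, parent, finished) frames
--     # instead of A's recursive dfs; a child's finish-step folds its dp value into its parent.
--     adj = [[] for _ in range(N)]
--     for e in edges:
--         adj[e[0]].append(e[1])
--         adj[e[1]].append(e[0])
--     dp = [0] * N
--     stack = [(0, -1, False)]
--     while stack:
--         v, p, done = stack.pop()
--         if done:
--             if v != 0 and len(adj[v]) == 1:
--                 dp[v] = A[v]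
--             else:
--                 dp[v] = min(dp[v], A[v])
--             if (v, p) != (0, -1):
--                 dp[p] += dp[v]
--         else:
--             stack.append((v, p, True))
--             for u in reversed(adj[v]):
--                 if u != p:
--                     stack.append((u, v, False))
--     return sum(A) - dp[0]
-- ===== Notes on version B (the rewrite author's own statement) =====
-- stated objective: alternative
-- what changed: The recursive dfs mutating a shared dp array is replaced by an iterative post-order traversal with an explicit stack of (node, parent, finished) frames, where a child's finish step folds its dp value into its parent's cell.
import Mathlib
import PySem

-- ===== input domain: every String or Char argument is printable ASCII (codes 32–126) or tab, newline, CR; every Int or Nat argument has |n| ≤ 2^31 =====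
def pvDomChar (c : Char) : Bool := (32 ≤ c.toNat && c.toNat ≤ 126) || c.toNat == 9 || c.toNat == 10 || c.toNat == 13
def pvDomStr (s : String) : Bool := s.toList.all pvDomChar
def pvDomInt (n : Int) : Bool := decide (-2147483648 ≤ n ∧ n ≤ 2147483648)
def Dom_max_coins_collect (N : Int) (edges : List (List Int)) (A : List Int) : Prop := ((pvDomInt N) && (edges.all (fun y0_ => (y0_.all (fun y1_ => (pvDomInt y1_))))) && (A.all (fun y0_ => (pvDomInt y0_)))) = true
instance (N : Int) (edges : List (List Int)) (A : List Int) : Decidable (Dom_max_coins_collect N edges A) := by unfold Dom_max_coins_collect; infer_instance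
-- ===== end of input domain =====

-- B replaces A's recursive dfs by an explicit iterative post-order stack of (node, parent, finished)
-- frames, a child's finish step folding its dp value into its parent (return value equivalence; A
-- mutates no argument).

-- ===== PORT A =====
-- shared adjacency plumbing (Python: adj[i].append(x), adj[v], dp[v], with negative-index wraparound)
def pvAppendAt (adj : List (List Int)) (i x : Int) : List (List Int) :=
  PySem.List.pySetD adj i (PySem.List.pyGetD adj i [] ++ [x])
def pvBuildAdj (N : Int) (edges : List (List Int)) : List (List Int) :=
  edges.foldl (fun adj e =>
    pvAppendAt (pvAppendAt adj (PySem.List.pyGetD e 0 0) (PySem.List.pyGetD e 1 0))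
      (PySem.List.pyGetD e 1 0) (PySem.List.pyGetD e 0 0)) (List.replicate N.toNat [])
def pvAdjAt (adj : List (List Int)) (v : Int) : List Int := PySem.List.pyGetD adj v []
def pvDpGet (dp : List Int) (i : Int) : Int := PySem.List.pyGetD dp i 0

-- A's dfs, the mutable dp threaded through; the Nat argument is a depth guard that Pre_ keeps ample
def pvDfsA (adj : List (List Int)) (A : List Int) : Nat → Int → Int → List Int → List Int
  | 0, _, _, dp => dp
  | k+1, v, p, dp =>
    let dp1 := (pvAdjAt adj v).foldl (fun dp u =>
      if u ≠ p then
        let d := pvDfsA adj A k u v dp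
        PySem.List.pySetD d v (pvDpGet d v + pvDpGet d u)
      else dp) dp
    if v ≠ 0 ∧ (pvAdjAt adj v).length = 1 then PySem.List.pySetD dp1 v (PySem.List.pyGetD A v 0)
    else PySem.List.pySetD dp1 v (min (pvDpGet dp1 v) (PySem.List.pyGetD A v 0))

def max_coins_collect (N : Int) (edges : List (List Int)) (A : List Int) : Int :=
  let adj := pvBuildAdj N edges
  let dp := pvDfsA adj A (2 * edges.length + 3) 0 (-1) (List.replicate N.toNat 0)
  A.sum - pvDpGet dp 0

-- ===== PORT B =====
-- B's while loop over the explicit stack; the Nat argument is a step guard that Pre_ keeps ample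
-- (none = the guard ran out; under Pre_ this does not happen)
def pvRun (adj : List (List Int)) (A : List Int) : Nat → List (Int × Int × Bool) → List Int → Option (List Int)
  | _, [], dp => some dp
  | 0, _ :: _, _ => none
  | k+1, (v, p, done) :: S, dp =>
    if done then
      let dp1 := if v ≠ 0 ∧ (pvAdjAt adj v).length = 1 then PySem.List.pySetD dp v (PySem.List.pyGetD A v 0)
        else PySem.List.pySetD dp v (min (pvDpGet dp v) (PySem.List.pyGetD A v 0))
      let dp2 := if v = 0 ∧ p = -1 then dp1 else PySem.List.pySetD dp1 p (pvDpGet dp1 p + pvDpGet dp1 v)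
      pvRun adj A k S dp2
    else
      pvRun adj A k (((pvAdjAt adj v).reverse).foldl (fun st u => if u ≠ p then (u, v, false) :: st else st) ((v, p, true) :: S)) dp

def max_coins_collect_alt (N : Int) (edges : List (List Int)) (A : List Int) : Int :=
  let adj := pvBuildAdj N edges
  let dp0 := List.replicate N.toNat 0
  match pvRun adj A (2 * (2 * edges.length + 2) ^ (2 * edges.length + 3)) [(0, -1, false)] dp0 with
  | some dp => A.sum - pvDpGet dp 0
  | none => A.sum - pvDpGet dp0 0

-- ===== PRECONDITION & SPEC =====
-- pvSafe k v p says: from the dfs state (node v entered from parent p) every non-backtracking walk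
-- dies out within k steps (so A's recursion terminates), never re-enters the root state (0, -1),
-- and only reads indices of A that Python accepts.
def pvSafe (adj : List (List Int)) (A : List Int) : Nat → Int → Int → Bool
  | 0, _, _ => false
  | k+1, v, p => !(v == 0 && p == -1) && decide (-(A.length : Int) ≤ v ∧ v < (A.length : Int)) && (pvAdjAt adj v).all (fun u => u == p || pvSafe adj A k u v)

-- Pre_ holds exactly where Python A returns: well-formed sizes and edge endpoints, and a dfs from
-- node 0 that terminates within the walk bound 2*|edges|+2 while indexing A in range.
def Pre_max_coins_collect (N : Int) (edges : List (List Int)) (A : List Int) : Prop :=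
  1 ≤ N ∧ 1 ≤ A.length ∧
  (∀ e ∈ edges, 2 ≤ e.length ∧ -N ≤ PySem.List.pyGetD e 0 0 ∧ PySem.List.pyGetD e 0 0 < N ∧
    -N ≤ PySem.List.pyGetD e 1 0 ∧ PySem.List.pyGetD e 1 0 < N) ∧
  (pvAdjAt (pvBuildAdj N edges) 0).all
    (fun u => u == (-1 : Int) || pvSafe (pvBuildAdj N edges) A (2 * edges.length + 2) u 0) = true

instance (N : Int) (edges : List (List Int)) (A : List Int) : Decidable (Pre_max_coins_collect N edges A) := by
  unfold Pre_max_coins_collect; infer_instance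

def pvWitness_max_coins_collect : Int × List (List Int) × List Int := (3, [[0, 1], [1, 2]], [5, 2, 3])

def Spec_max_coins_collect (N : Int) (edges : List (List Int)) (A : List Int) (out : Int) : Prop := out = max_coins_collect_alt N edges A
instance (N : Int) (edges : List (List Int)) (A : List Int) (out : Int) : Decidable (Spec_max_coins_collect N edges A out) := by unfold Spec_max_coins_collect; infer_instance

-- ===== CLAIM (what is proved, stated in full; the proofs are below) =====
def Claim_equal_max_coins_collect : Prop := ∀ (N : Int) (edges : List (List Int)) (A : List Int), Dom_max_coins_collect N edges A → Pre_max_coins_collect N edges A → Spec_max_coins_collect N edges A (max_coins_collect N edges A)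

-- ===== LEMMAS AND PROOFS =====

-- proof-side names for the two loop bodies shared by the ports
def pvBody (adj : List (List Int)) (A : List Int) (k : Nat) (v p : Int) : List Int → Int → List Int :=
  fun dp u =>
    if u ≠ p then
      PySem.List.pySetD (pvDfsA adj A k u v dp) v
        (pvDpGet (pvDfsA adj A k u v dp) v + pvDpGet (pvDfsA adj A k u v dp) u)
    else dp

def pvFinish (adj : List (List Int)) (A : List Int) (v : Int) (dp : List Int) : List Int :=
  if v ≠ 0 ∧ (pvAdjAt adj v).length = 1 then PySem.List.pySetD dp v (PySem.List.pyGetD A v 0)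
  else PySem.List.pySetD dp v (min (pvDpGet dp v) (PySem.List.pyGetD A v 0))

-- the value a finished child v (entered from parent p) leaves behind: its own dp cell finalised,
-- then folded into the parent cell p — exactly A's loop body for that child
def pvChildEff (adj : List (List Int)) (A : List Int) (k : Nat) (v p : Int) (dp : List Int) : List Int :=
  PySem.List.pySetD (pvDfsA adj A k v p dp) p
    (pvDpGet (pvDfsA adj A k v p dp) p + pvDpGet (pvDfsA adj A k v p dp) v)

lemma pvDfsA_succ (adj : List (List Int)) (A : List Int) (k : Nat) (v p : Int) (dp : List Int) :
    pvDfsA adj A (k+1) v p dp = pvFinish adj A v ((pvAdjAt adj v).foldl (pvBody adj A k v p) dp) := by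
  simp only [pvDfsA, pvFinish]
  rfl

lemma pvRun_nil (adj : List (List Int)) (A : List Int) (g : Nat) (dp : List Int) :
    pvRun adj A g [] dp = some dp := by
  cases g <;> simp [pvRun]

lemma pvRun_zero (adj : List (List Int)) (A : List Int) (v p : Int) (b : Bool)
    (S : List (Int × Int × Bool)) (dp : List Int) : pvRun adj A 0 ((v, p, b) :: S) dp = none := by
  simp [pvRun]

lemma pvRun_expand (adj : List (List Int)) (A : List Int) (g : Nat) (v p : Int)
    (S : List (Int × Int × Bool)) (dp : List Int) :
    pvRun adj A (g+1) ((v, p, false) :: S) dp =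
      pvRun adj A g (((pvAdjAt adj v).reverse).foldl
        (fun st u => if u ≠ p then (u, v, false) :: st else st) ((v, p, true) :: S)) dp := by
  simp [pvRun]

lemma pvRun_done (adj : List (List Int)) (A : List Int) (g : Nat) (v p : Int)
    (S : List (Int × Int × Bool)) (dp : List Int) :
    pvRun adj A (g+1) ((v, p, true) :: S) dp =
      pvRun adj A g S (if v = 0 ∧ p = -1 then pvFinish adj A v dp
        else PySem.List.pySetD (pvFinish adj A v dp) p
          (pvDpGet (pvFinish adj A v dp) p + pvDpGet (pvFinish adj A v dp) v)) := by
  simp [pvRun, pvFinish]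

-- total length of all adjacency slots
def pvSumLen (adj : List (List Int)) : Nat := (adj.map List.length).sum

lemma pv_sum_set (l : List (List Int)) : ∀ (k : Nat) (y : List Int), (hk : k < l.length) →
    ((l.set k y).map List.length).sum + l[k].length = (l.map List.length).sum + y.length := by
  induction l with
  | nil => intro k y hk; simp at hk
  | cons h t ih =>
    intro k y hk
    cases k with
    | zero => simp [List.set]; omega
    | succ k =>
      simp only [List.set, List.map_cons, List.sum_cons, List.getElem_cons_succ]
      have := ih k y (by simpa using hk)
      omega

lemma pv_appendAt_sumLen (adj : List (List Int)) (i x : Int) :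
    pvSumLen (pvAppendAt adj i x) ≤ pvSumLen adj + 1 := by
  unfold pvAppendAt PySem.List.pySetD PySem.List.pySet?
  cases hidx : PySem.List.pyIdx? adj.length i with
  | none => simp
  | some k =>
    have hk : k < adj.length := by
      unfold PySem.List.pyIdx? at hidx
      split_ifs at hidx <;> simp_all <;> omega
    have hget : PySem.List.pyGetD adj i [] = adj[k] := by
      unfold PySem.List.pyGetD PySem.List.pyGet?
      rw [hidx]
      simp [List.getElem?_eq_getElem hk]
    simp only [Option.map_some, Option.getD_some, hget]
    have h2 := pv_sum_set adj k (adj[k] ++ [x]) hk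
    unfold pvSumLen
    simp only [List.length_append, List.length_cons, List.length_nil] at h2
    omega

lemma pv_buildAdj_sumLen (N : Int) (edges : List (List Int)) :
    pvSumLen (pvBuildAdj N edges) ≤ 2 * edges.length := by
  have aux : ∀ (es : List (List Int)) (a0 : List (List Int)),
      pvSumLen (es.foldl (fun adj e =>
        pvAppendAt (pvAppendAt adj (PySem.List.pyGetD e 0 0) (PySem.List.pyGetD e 1 0))
          (PySem.List.pyGetD e 1 0) (PySem.List.pyGetD e 0 0)) a0) ≤ pvSumLen a0 + 2 * es.length := by
    intro es
    induction es with
    | nil => intro a0; simp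
    | cons e es ih =>
      intro a0
      simp only [List.foldl_cons, List.length_cons]
      have h0 := ih (pvAppendAt (pvAppendAt a0 (PySem.List.pyGetD e 0 0) (PySem.List.pyGetD e 1 0))
        (PySem.List.pyGetD e 1 0) (PySem.List.pyGetD e 0 0))
      have h1 := pv_appendAt_sumLen a0 (PySem.List.pyGetD e 0 0) (PySem.List.pyGetD e 1 0)
      have h2 := pv_appendAt_sumLen (pvAppendAt a0 (PySem.List.pyGetD e 0 0) (PySem.List.pyGetD e 1 0))
        (PySem.List.pyGetD e 1 0) (PySem.List.pyGetD e 0 0)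
      omega
  have hrep : pvSumLen (List.replicate N.toNat ([] : List Int)) = 0 := by
    simp [pvSumLen]
  have := aux edges (List.replicate N.toNat [])
  unfold pvBuildAdj
  omega

lemma pv_adjAt_len (N : Int) (edges : List (List Int)) (v : Int) :
    (pvAdjAt (pvBuildAdj N edges) v).length ≤ 2 * edges.length := by
  unfold pvAdjAt PySem.List.pyGetD
  cases hg : PySem.List.pyGet? (pvBuildAdj N edges) v with
  | none => simp
  | some l =>
    simp only [Option.getD_some]
    have hm : l ∈ pvBuildAdj N edges := by
      apply PySem.List.mem_of_pyGet?_eq_some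
      exact hg
    have h1 : l.length ≤ pvSumLen (pvBuildAdj N edges) :=
      List.le_sum_of_mem (List.mem_map_of_mem hm)
    have h2 := pv_buildAdj_sumLen N edges
    omega

-- extra step budget never hurts pvRun
lemma pvRun_mono (adj : List (List Int)) (A : List Int) :
    ∀ (g : Nat) (S : List (Int × Int × Bool)) (dp r : List Int), pvRun adj A g S dp = some r →
      ∀ (d : Nat), pvRun adj A (g + d) S dp = some r := by
  intro g
  induction g with
  | zero =>
    intro S dp r h d
    cases S with
    | nil => rw [pvRun_nil] at h; rw [pvRun_nil]; exact h
    | cons f S => obtain ⟨v, p, b⟩ := f; rw [pvRun_zero] at h; exact absurd h (by simp)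
  | succ g ih =>
    intro S dp r h d
    cases S with
    | nil => rw [pvRun_nil] at h; rw [pvRun_nil]; exact h
    | cons f S =>
      obtain ⟨v, p, b⟩ := f
      have hshape : g + 1 + d = (g + d) + 1 := by omega
      rw [hshape]
      cases b with
      | false => rw [pvRun_expand] at h; rw [pvRun_expand]; exact ih _ _ _ h d
      | true => rw [pvRun_done] at h; rw [pvRun_done]; exact ih _ _ _ h d

-- shared step-budget arithmetic: a node with ≤ W - 2 children, each costing 2·W^k, plus its two
-- own steps, fits in 2·W^(k+1)
lemma pv_budget (W k L g : Nat) (hL : L + 2 ≤ W) :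
    L * (2 * W ^ k) + (g + 1) + 1 ≤ 2 * W ^ (k+1) + g := by
  have hW2 : 2 ≤ W := by omega
  obtain ⟨m, hm⟩ := Nat.exists_eq_add_of_le hW2
  have hck : 1 ≤ W ^ k := Nat.one_le_pow _ _ (by omega)
  have h1 : L * (2 * W ^ k) ≤ m * (2 * W ^ k) := Nat.mul_le_mul_right _ (by omega)
  have h2 : m * (2 * W ^ k) + 4 * W ^ k = 2 * W ^ (k+1) := by
    subst hm; rw [pow_succ]; ring
  omega

-- the stack segment for a child list behaves like A's loop over that list (hframe processes one
-- safe child frame; consumed below both inside pvRun_frame's induction and at the root)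
lemma pvRun_loop (adj : List (List Int)) (A : List Int) (W k : Nat) (v p : Int)
    (hframe : ∀ (v' p' : Int) (S : List (Int × Int × Bool)) (dp r : List Int) (g : Nat),
      pvSafe adj A k v' p' = true →
      pvRun adj A g S (pvChildEff adj A k v' p' dp) = some r →
      pvRun adj A (2 * W ^ k + g) ((v', p', false) :: S) dp = some r) :
    ∀ (L : List Int), (∀ u ∈ L, u = p ∨ pvSafe adj A k u v = true) →
      ∀ (T : List (Int × Int × Bool)) (dp r : List Int) (g : Nat),
        pvRun adj A g T (L.foldl (pvBody adj A k v p) dp) = some r →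
        pvRun adj A (L.length * (2 * W ^ k) + g)
          (L.foldr (fun u acc => if u ≠ p then (u, v, false) :: acc else acc) T) dp = some r := by
  intro L
  induction L with
  | nil => intro _ T dp r g h; simpa using h
  | cons u L ihL =>
    intro hmem T dp r g h
    simp only [List.foldr_cons, List.foldl_cons, List.length_cons] at h ⊢
    by_cases hup : u = p
    · rw [if_neg (not_not_intro hup)]
      have hb : pvBody adj A k v p dp u = dp := by simp [pvBody, hup]
      rw [hb] at h
      have h1 := ihL (fun x hx => hmem x (List.mem_cons_of_mem _ hx)) T dp r g h
      have h2 := pvRun_mono adj A _ _ _ _ h1 (2 * W ^ k)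
      have harith : (L.length + 1) * (2 * W ^ k) + g = L.length * (2 * W ^ k) + g + 2 * W ^ k := by
        ring
      rw [harith]; exact h2
    · rw [if_pos hup]
      have hsafe : pvSafe adj A k u v = true := by
        rcases hmem u (by simp) with h' | h'
        · exact absurd h' hup
        · exact h'
      have hb : pvBody adj A k v p dp u = pvChildEff adj A k u v dp := by
        simp [pvBody, pvChildEff, if_pos hup]
      rw [hb] at h
      have hrec := ihL (fun x hx => hmem x (List.mem_cons_of_mem _ hx)) T
        (pvChildEff adj A k u v dp) r g h
      have h1 := hframe u v _ dp r (L.length * (2 * W ^ k) + g) hsafe hrec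
      have harith : (L.length + 1) * (2 * W ^ k) + g = 2 * W ^ k + (L.length * (2 * W ^ k) + g) := by
        ring
      rw [harith]; exact h1

-- processing one safe unexpanded frame is exactly A's loop body for that child
-- (W bounds every adjacency slot length + 2)
lemma pvRun_frame (adj : List (List Int)) (A : List Int) (W : Nat)
    (hW : ∀ v : Int, (pvAdjAt adj v).length + 2 ≤ W) :
    ∀ (k : Nat) (v p : Int) (S : List (Int × Int × Bool)) (dp r : List Int) (g : Nat),
      pvSafe adj A k v p = true →
      pvRun adj A g S (pvChildEff adj A k v p dp) = some r →
      pvRun adj A (2 * W ^ k + g) ((v, p, false) :: S) dp = some r := by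
  intro k
  induction k with
  | zero => intro v p S dp r g hsafe; simp [pvSafe] at hsafe
  | succ k ih =>
    intro v p S dp r g hsafe h
    have hW2 : 2 ≤ W := by have := hW 0; omega
    have hpow1 : 1 ≤ W ^ (k + 1) := Nat.one_le_pow _ _ (by omega)
    simp only [pvSafe, Bool.and_eq_true, List.all_eq_true] at hsafe
    obtain ⟨⟨hroot, hrange⟩, hall⟩ := hsafe
    have hroot' : ¬(v = 0 ∧ p = -1) := by
      rintro ⟨h1, h2⟩
      subst h1; subst h2; simp at hroot
    have hallm : ∀ u ∈ pvAdjAt adj v, u = p ∨ pvSafe adj A k u v = true := by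
      intro u hu
      have h' := hall u hu
      simp only [Bool.or_eq_true, beq_iff_eq] at h'
      exact h'
    set a := (pvAdjAt adj v).length * (2 * W ^ k) with ha
    set P := 2 * W ^ (k + 1) with hP
    have hbud := pv_budget W k (pvAdjAt adj v).length g (hW v)
    rw [← ha, ← hP] at hbud
    have hP1 : P + g = (P + g - 1) + 1 := by omega
    rw [hP1, pvRun_expand, List.foldl_reverse]
    set g2 := P + g - 1 - a with hg2
    have hdone : pvRun adj A g2 ((v, p, true) :: S)
        ((pvAdjAt adj v).foldl (pvBody adj A k v p) dp) = some r := by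
      have hg2shape : g2 = (g2 - 1) + 1 := by omega
      rw [hg2shape, pvRun_done, if_neg hroot', ← pvDfsA_succ]
      have hmo := pvRun_mono adj A g S _ r h (g2 - 1 - g)
      have hge : g + (g2 - 1 - g) = g2 - 1 := by omega
      rw [hge] at hmo
      exact hmo
    have hloop := pvRun_loop adj A W k v p ih (pvAdjAt adj v) hallm ((v, p, true) :: S) dp r g2 hdone
    have hfeq : P + g - 1 = (pvAdjAt adj v).length * (2 * W ^ k) + g2 := by rw [← ha]; omega
    rw [hfeq]
    exact hloop

-- ===== VERDICT (by name: the statement is the Claim_ definition above) =====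
theorem max_coins_collect_spec : Claim_equal_max_coins_collect := by
  intro N edges A _hdom hpre
  obtain ⟨hN, hA, hedges, hall⟩ := hpre
  simp only [Spec_max_coins_collect, max_coins_collect, max_coins_collect_alt]
  have hW : ∀ v : Int,
      (pvAdjAt (pvBuildAdj N edges) v).length + 2 ≤ 2 * edges.length + 2 := by
    intro v; have := pv_adjAt_len N edges v; omega
  have hallm : ∀ u ∈ pvAdjAt (pvBuildAdj N edges) 0,
      u = (-1 : Int) ∨ pvSafe (pvBuildAdj N edges) A (2 * edges.length + 2) u 0 = true := by
    simp only [List.all_eq_true, Bool.or_eq_true, beq_iff_eq] at hall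
    exact hall
  have hrun : pvRun (pvBuildAdj N edges) A
      (2 * (2 * edges.length + 2) ^ (2 * edges.length + 3)) [(0, -1, false)]
      (List.replicate N.toNat 0)
      = some (pvDfsA (pvBuildAdj N edges) A (2 * edges.length + 3) 0 (-1)
          (List.replicate N.toNat 0)) := by
    set W := 2 * edges.length + 2 with hWd
    have hexp : 2 * edges.length + 3 = W + 1 := by omega
    rw [hexp]
    have hpow1 : 1 ≤ W ^ (W + 1) := Nat.one_le_pow _ _ (by omega)
    set a := (pvAdjAt (pvBuildAdj N edges) 0).length * (2 * W ^ W) with ha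
    set P := 2 * W ^ (W + 1) with hP
    have hbud := pv_budget W W (pvAdjAt (pvBuildAdj N edges) 0).length 0 (hW 0)
    rw [← ha, ← hP] at hbud
    have hP1 : P = (P - 1) + 1 := by omega
    rw [hP1, pvRun_expand, List.foldl_reverse]
    set g2 := P - 1 - a with hg2
    have hdone : pvRun (pvBuildAdj N edges) A g2 [((0 : Int), (-1 : Int), true)]
        ((pvAdjAt (pvBuildAdj N edges) 0).foldl (pvBody (pvBuildAdj N edges) A W 0 (-1))
          (List.replicate N.toNat 0))
        = some (pvDfsA (pvBuildAdj N edges) A (W + 1) 0 (-1) (List.replicate N.toNat 0)) := by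
      have hg2shape : g2 = (g2 - 1) + 1 := by omega
      rw [hg2shape, pvRun_done, if_pos ⟨rfl, rfl⟩, ← pvDfsA_succ, pvRun_nil]
    have hloop := pvRun_loop (pvBuildAdj N edges) A W W 0 (-1)
      (pvRun_frame (pvBuildAdj N edges) A W hW W) (pvAdjAt (pvBuildAdj N edges) 0) hallm
      [((0 : Int), (-1 : Int), true)] (List.replicate N.toNat 0) _ g2 hdone
    have hfeq : P - 1 = (pvAdjAt (pvBuildAdj N edges) 0).length * (2 * W ^ W) + g2 := by
      rw [← ha]; omega
    rw [hfeq]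
    exact hloop
  rw [hrun]
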